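-- pv_equiv track=rewrite | github.com/Enjef/Algo | 2100 - 2199/2155 - All Divisions With the Highest Score of a Binary Array/2155 - All Divisions With the Highest Score of a Binary Array.py | maxScoreIndices_best_speed
-- ===== SOURCE A (Python) =====
-- from typing import List
--
-- def maxScoreIndices_best_speed(nums: List[int]) -> List[int]:
--     nums = nums[::-1]
--     maxScore = score = sum(nums)
--     indices = [0]
--     i = 1
--     while nums:
--         v = nums.pop()
--         if v == 1:
--             score -= 1
--         else:
--             score += 1
--         if score > maxScore:
--             indices = [i]
--             maxScore = score
--         elif score == maxScore:
--             indices.append(i)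
--         i += 1
--     return indices
-- ===== SOURCE B (Python) =====
-- from typing import List
--
-- def maxScoreIndices_best_speed(nums: List[int]) -> List[int]:
--     cur = sum(nums)
--     scores = [cur]
--     for x in nums:
--         cur += -1 if x == 1 else 1
--         scores.append(cur)
--     m = max(scores)
--     return [i for i, s in enumerate(scores) if s == m]
-- ===== Notes on version B (the rewrite author's own statement) =====
-- stated objective: simpler
-- what changed: Replaces A's reverse/pop while-loop with online running-best tracking by a build-the-full-scores-table pass followed by an offline max and an enumerate filter.
import Mathlib
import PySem

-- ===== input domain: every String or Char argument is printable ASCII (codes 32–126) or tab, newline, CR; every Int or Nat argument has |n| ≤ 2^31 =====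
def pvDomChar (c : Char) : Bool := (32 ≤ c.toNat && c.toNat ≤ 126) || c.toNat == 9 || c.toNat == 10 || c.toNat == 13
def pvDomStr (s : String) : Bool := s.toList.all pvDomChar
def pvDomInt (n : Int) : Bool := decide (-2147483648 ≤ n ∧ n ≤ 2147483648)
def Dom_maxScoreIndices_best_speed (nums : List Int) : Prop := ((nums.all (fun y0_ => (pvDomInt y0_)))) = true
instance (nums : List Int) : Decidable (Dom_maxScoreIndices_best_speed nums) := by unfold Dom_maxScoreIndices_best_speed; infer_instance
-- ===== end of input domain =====

-- B replaces A's reverse/pop online running-best loop with a build-scores-table then offline max + filter decomposition (simpler).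

-- ===== PORT A =====
-- the Python while loop popping from the reversed list; recursion on the stack's length
def pvLoopA (stack : List Int) (score maxScore : Int) (indices : List Int) (i : Int) : List Int :=
  match h : PySem.List.pop? stack (-1) with
  | none => indices
  | some (v, rest) =>
    let score' := if v == 1 then score - 1 else score + 1
    if score' > maxScore then pvLoopA rest score' score' [i] (i + 1)
    else if score' == maxScore then pvLoopA rest score' maxScore (indices ++ [i]) (i + 1)
    else pvLoopA rest score' maxScore indices (i + 1)
termination_by stack.length
decreasing_by all_goals (have := PySem.List.length_of_pop?_eq_some stack h; simp at this ⊢; omega)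

def maxScoreIndices_best_speed (nums : List Int) : List Int :=
  let numsR := (PySem.List.slice? nums none none (-1)).getD []  -- nums[::-1] (step -1 never fails)
  pvLoopA numsR numsR.sum numsR.sum [0] 1

-- ===== PORT B =====
def maxScoreIndices_best_speed_alt (nums : List Int) : List Int :=
  let s := nums.sum
  let st := nums.foldl (fun (st : Int × List Int) x =>
      let cur := st.1 + (if x == 1 then -1 else 1)
      (cur, st.2 ++ [cur])) (s, [s])
  match PySem.List.max? st.2 (fun y => y) with
  | none => []  -- unreachable: scores is nonempty
  | some m => (PySem.List.enumerate st.2 0).filterMap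
      (fun p => if p.2 == m then some p.1 else none)

-- ===== PRECONDITION & SPEC =====
def Spec_maxScoreIndices_best_speed (nums : List Int) (out : List Int) : Prop := out = maxScoreIndices_best_speed_alt nums
instance (nums : List Int) (out : List Int) : Decidable (Spec_maxScoreIndices_best_speed nums out) := by unfold Spec_maxScoreIndices_best_speed; infer_instance

-- ===== CLAIM (what is proved, stated in full; the proofs are below) =====
def Claim_equal_maxScoreIndices_best_speed : Prop := ∀ (nums : List Int), Dom_maxScoreIndices_best_speed nums → Spec_maxScoreIndices_best_speed nums (maxScoreIndices_best_speed nums)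

-- ===== LEMMAS AND PROOFS =====

-- the score after each prefix (scores[1:] of B), starting from s
def pvScoresT : List Int → Int → List Int
  | [], _ => []
  | x :: xs, s =>
    let s' := if x == 1 then s - 1 else s + 1
    s' :: pvScoresT xs s'

-- indices (starting at i) of the entries equal to M
def pvSel : List Int → Int → Int → List Int
  | [], _, _ => []
  | s :: ss, M, i => (if s = M then [i] else []) ++ pvSel ss M (i + 1)

-- A's loop restated as structural recursion on the original (unreversed) list
def pvGo : List Int → Int → Int → List Int → Int → List Int
  | [], _, _, ind, _ => ind
  | x :: xs, s, m, ind, i =>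
    let s' := if x == 1 then s - 1 else s + 1
    if s' > m then pvGo xs s' s' [i] (i + 1)
    else if s' == m then pvGo xs s' m (ind ++ [i]) (i + 1)
    else pvGo xs s' m ind (i + 1)

theorem pvLoopA_reverse (xs : List Int) : ∀ s m ind i,
    pvLoopA xs.reverse s m ind i = pvGo xs s m ind i := by
  induction xs with
  | nil =>
    intro s m ind i
    rw [pvLoopA]
    split
    · rw [pvGo]
    · next v rest h => simp [PySem.List.pop?, PySem.List.pyIdx?] at h
  | cons x xs ih =>
    intro s m ind i
    have hp : PySem.List.pop? (x :: xs).reverse = some (x, xs.reverse) := by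
      rw [List.reverse_cons]; exact PySem.List.pop?_last _ _
    rw [pvLoopA]
    split
    · next h => rw [hp] at h; cases h
    · next v rest h =>
      rw [hp] at h
      obtain ⟨rfl, rfl⟩ := Prod.mk.inj (Option.some.inj h)
      rw [pvGo]
      simp only [ih]

theorem pvInitLeFoldlMax (l : List Int) : ∀ b : Int, b ≤ l.foldl max b := by
  induction l with
  | nil => intro b; simp
  | cons x l ih =>
    intro b
    simp only [List.foldl_cons]
    exact le_trans (le_max_left b x) (ih _)

theorem pvGo_spec (xs : List Int) : ∀ s m ind i,
    pvGo xs s m ind i =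
      (if (pvScoresT xs s).foldl max m = m then ind else []) ++
        pvSel (pvScoresT xs s) ((pvScoresT xs s).foldl max m) i := by
  induction xs with
  | nil => intro s m ind i; simp [pvGo, pvScoresT, pvSel]
  | cons x xs ih =>
    intro s m ind i
    rw [pvGo, pvScoresT]
    set s' := if x == 1 then s - 1 else s + 1 with hs'
    simp only [List.foldl_cons, pvSel]
    have hM : ∀ c : Int, c ≤ (pvScoresT xs s').foldl max c := fun c => pvInitLeFoldlMax _ c
    by_cases h1 : s' > m
    · rw [if_pos h1, ih]
      have hmax : max m s' = s' := by omega
      simp only [hmax]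
      have hge : s' ≤ (pvScoresT xs s').foldl max s' := hM s'
      rw [if_neg (by omega : ¬ (pvScoresT xs s').foldl max s' = m)]
      simp only [List.nil_append]
      by_cases h2 : (pvScoresT xs s').foldl max s' = s'
      · rw [if_pos h2, if_pos h2.symm]
      · rw [if_neg h2, if_neg (fun h => h2 h.symm)]
    · rw [if_neg h1]
      have hmax : max m s' = m := by omega
      simp only [hmax]
      have hge : m ≤ (pvScoresT xs s').foldl max m := hM m
      by_cases h2 : s' = m
      · rw [if_pos (by simp [h2]), ih, h2]
        by_cases h3 : (pvScoresT xs m).foldl max m = m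
        · rw [if_pos h3, if_pos h3, if_pos h3.symm]
          simp
        · rw [if_neg h3, if_neg h3, if_neg (fun h => h3 h.symm)]
          simp
      · rw [if_neg (by simp [h2]), ih]
        have hne : ¬ s' = (pvScoresT xs s').foldl max m := by omega
        rw [if_neg hne]
        simp

theorem pvFoldlB (xs : List Int) : ∀ c acc,
    (xs.foldl (fun (st : Int × List Int) x =>
      (st.1 + (if x == 1 then -1 else 1), st.2 ++ [st.1 + (if x == 1 then -1 else 1)])) (c, acc)).2
      = acc ++ pvScoresT xs c := by
  induction xs with
  | nil => intro c acc; simp [pvScoresT]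
  | cons x xs ih =>
    intro c acc
    have hd : c + (if x == 1 then (-1:Int) else 1) = (if x == 1 then c - 1 else c + 1) := by
      by_cases h : x == 1 <;> simp [h]; ring
    simp only [List.foldl_cons, hd, ih, pvScoresT, List.append_assoc, List.singleton_append]

theorem pvFilterMapSel (ss : List Int) : ∀ (M : Int) (i : Int),
    (PySem.List.enumerate ss i).filterMap (fun p => if p.2 == M then some p.1 else none)
      = pvSel ss M i := by
  induction ss with
  | nil => intro M i; simp [PySem.List.enumerate_nil, pvSel]
  | cons s ss ih =>
    intro M i
    rw [PySem.List.enumerate_cons, pvSel]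
    simp only [List.filterMap_cons, ih]
    by_cases h : s = M <;> simp [h]

-- ===== VERDICT (by name: the statement is the Claim_ definition above) =====
theorem maxScoreIndices_best_speed_spec : Claim_equal_maxScoreIndices_best_speed := by
  intro nums _
  unfold Spec_maxScoreIndices_best_speed
  unfold maxScoreIndices_best_speed maxScoreIndices_best_speed_alt
  rw [PySem.List.slice?_none_none_neg_one]
  simp only [Option.getD_some, List.sum_reverse]
  rw [pvLoopA_reverse, pvGo_spec, pvFoldlB nums nums.sum [nums.sum]]
  simp only [List.singleton_append, PySem.List.max?_id_cons]
  rw [pvFilterMapSel]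
  rw [pvSel]
  set F := (pvScoresT nums nums.sum).foldl max nums.sum with hF
  by_cases h : F = nums.sum
  · rw [if_pos h, if_pos h.symm]
    norm_num
  · rw [if_neg h, if_neg (fun hh => h hh.symm)]
    norm_num
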